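-- pv_equiv track=rewrite | github.com/VerstraeteBert/algos-ds | test/vraag4/src/yahtzee/18.py | is_grote_straat
-- ===== SOURCE A (Python) =====
-- def is_grote_straat(lijst):
--     lengte = len(lijst)
--     lijst = sorted(list(set(lijst)))
--     lengte2 = len(lijst)
--     if lengte != lengte2:
--         return False
--     bereik = len(lijst) - 1
--     for i in range(bereik):
--         if lijst[i] + 1 != lijst[i + 1]:
--             return False
--
--     return True
-- ===== SOURCE B (Python) =====
-- def is_grote_straat(lijst):
--     s = set(lijst)
--     if len(s) != len(lijst):
--         return False
--     if not lijst:
--         return True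
--     return max(s) - min(s) == len(lijst) - 1
-- ===== Notes on version B (the rewrite author's own statement) =====
-- stated objective: faster
-- what changed: Replaces A's sort-then-pairwise-scan with a closed-form test: distinctness via set size plus max(s) - min(s) == len - 1, removing the sort entirely.
import Mathlib
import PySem

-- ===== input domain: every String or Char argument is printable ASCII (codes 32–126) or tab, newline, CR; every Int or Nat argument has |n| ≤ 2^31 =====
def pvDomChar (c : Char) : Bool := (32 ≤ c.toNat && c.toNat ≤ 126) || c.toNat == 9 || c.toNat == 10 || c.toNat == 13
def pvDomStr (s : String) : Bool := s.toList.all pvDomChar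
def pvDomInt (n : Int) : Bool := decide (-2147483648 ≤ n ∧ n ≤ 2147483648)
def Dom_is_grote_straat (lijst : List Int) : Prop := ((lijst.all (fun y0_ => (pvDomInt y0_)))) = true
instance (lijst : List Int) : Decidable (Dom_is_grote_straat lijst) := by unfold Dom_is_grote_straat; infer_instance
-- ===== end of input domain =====

-- B replaces A's sort-then-pairwise-scan with the closed-form test
-- "no duplicates and max - min == len - 1", removing the sort (objective: faster).

-- ===== PORT A =====
def is_grote_straat (lijst : List Int) : Bool :=
  let lengte := lijst.length
  let lijst2 := PySem.List.sorted (PySem.Set.ofList lijst) (fun x => x) false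
  let lengte2 := lijst2.length
  if lengte ≠ lengte2 then false
  else
    let bereik := lijst2.length - 1
    (List.range bereik).all (fun i =>
      PySem.List.pyGetD lijst2 (i : Int) 0 + 1 == PySem.List.pyGetD lijst2 ((i : Int) + 1) 0)

-- ===== PORT B =====
def is_grote_straat_alt (lijst : List Int) : Bool :=
  let s := PySem.Set.ofList lijst
  if s.length ≠ lijst.length then false
  else if lijst.isEmpty then true
  else
    match PySem.List.max? s (fun x => x), PySem.List.min? s (fun x => x) with
    | some mx, some mn => mx - mn == (lijst.length : Int) - 1
    | _, _ => false

-- ===== PRECONDITION & SPEC =====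
def Spec_is_grote_straat (lijst : List Int) (out : Bool) : Prop := out = is_grote_straat_alt lijst
instance (lijst : List Int) (out : Bool) : Decidable (Spec_is_grote_straat lijst out) := by unfold Spec_is_grote_straat; infer_instance

-- ===== CLAIM (what is proved, stated in full; the proofs are below) =====
def Claim_equal_is_grote_straat : Prop := ∀ (lijst : List Int), Dom_is_grote_straat lijst → Spec_is_grote_straat lijst (is_grote_straat lijst)

-- ===== LEMMAS AND PROOFS =====

-- In a strictly increasing integer list a :: t, the last element is at least a + t.length.
lemma last_ge_of_chain_lt (a : Int) (t : List Int)
    (h : (a :: t).IsChain (· < ·)) :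
    a + t.length ≤ (a :: t).getLast (List.cons_ne_nil a t) := by
  induction t generalizing a with
  | nil => simp
  | cons b t ih =>
    rw [List.isChain_cons_cons] at h
    have hlast : (a :: b :: t).getLast (List.cons_ne_nil a (b :: t))
        = (b :: t).getLast (List.cons_ne_nil b t) := by
      simp [List.getLast_cons]
    rw [hlast]
    have := ih b h.2
    have hab : a < b := h.1
    simp only [List.length_cons] at *
    push_cast at *
    omega

-- Every element of a strictly increasing list is ≤ its last element.
lemma mem_le_last_of_chain_lt (l : List Int) (h : l.IsChain (· < ·)) (hne : l ≠ [])
    (y : Int) (hy : y ∈ l) : y ≤ l.getLast hne := by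
  induction l with
  | nil => cases hy
  | cons a t ih =>
    cases t with
    | nil => simp at hy; simp [hy]
    | cons b t' =>
      rw [List.isChain_cons_cons] at h
      have hlast : (a :: b :: t').getLast (List.cons_ne_nil a (b :: t'))
          = (b :: t').getLast (List.cons_ne_nil b t') := by
        simp [List.getLast_cons]
      rw [hlast]
      rcases List.mem_cons.1 hy with rfl | hy'
      · have hb := last_ge_of_chain_lt b t' h.2
        have hab := h.1
        omega
      · exact ih h.2 (List.cons_ne_nil b t') hy'

-- Every element of a strictly increasing list is ≥ its head.
lemma head_le_mem_of_chain_lt (a : Int) (t : List Int)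
    (h : (a :: t).IsChain (· < ·)) (y : Int) (hy : y ∈ a :: t) : a ≤ y := by
  rcases List.mem_cons.1 hy with rfl | hy'
  · exact le_refl _
  · exact le_of_lt ((List.pairwise_cons.1 (List.isChain_iff_pairwise.1 h)).1 y hy')

-- Chain of +1 gives last = head + length of tail.
lemma last_eq_of_chain_succ (a : Int) (t : List Int)
    (h : (a :: t).IsChain (fun x y => x + 1 = y)) :
    (a :: t).getLast (List.cons_ne_nil a t) = a + t.length := by
  induction t generalizing a with
  | nil => simp
  | cons b t ih =>
    rw [List.isChain_cons_cons] at h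
    have hlast : (a :: b :: t).getLast (List.cons_ne_nil a (b :: t))
        = (b :: t).getLast (List.cons_ne_nil b t) := by
      simp [List.getLast_cons]
    rw [hlast, ih b h.2]
    have := h.1
    simp only [List.length_cons]
    push_cast
    omega

-- Strictly increasing + last = head + (len-1) forces the +1 chain.
lemma chain_succ_of_last_eq (a : Int) (t : List Int)
    (h : (a :: t).IsChain (· < ·))
    (hl : (a :: t).getLast (List.cons_ne_nil a t) = a + t.length) :
    (a :: t).IsChain (fun x y => x + 1 = y) := by
  induction t generalizing a with
  | nil => simp
  | cons b t ih =>
    rw [List.isChain_cons_cons] at h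
    have hlast : (a :: b :: t).getLast (List.cons_ne_nil a (b :: t))
        = (b :: t).getLast (List.cons_ne_nil b t) := by
      simp [List.getLast_cons]
    rw [hlast] at hl
    have hge := last_ge_of_chain_lt b t h.2
    have hab : a < b := h.1
    simp only [List.length_cons] at hl
    push_cast at hl
    have hb : b = a + 1 := by omega
    rw [List.isChain_cons_cons]
    refine ⟨by omega, ih b h.2 ?_⟩
    rw [hlast] at *
    omega

-- A's pairwise loop over the sorted list says exactly "the list is a +1 chain".
lemma loopA_iff_chain (srt : List Int) :
    ((List.range (srt.length - 1)).all fun i =>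
      PySem.List.pyGetD srt (i : Int) 0 + 1 == PySem.List.pyGetD srt ((i : Int) + 1) 0) = true
    ↔ srt.IsChain (fun x y => x + 1 = y) := by
  rw [List.all_eq_true, List.isChain_iff_getElem]
  constructor
  · intro h i hi
    have hmem : i ∈ List.range (srt.length - 1) := List.mem_range.2 (by omega)
    have := h i hmem
    have h1 : PySem.List.pyGetD srt (i : Int) 0 = srt[i] := by
      rw [PySem.List.pyGetD_natCast, List.getD_eq_getElem _ _ (by omega)]
    have h2 : PySem.List.pyGetD srt ((i : Int) + 1) 0 = srt[i + 1] := by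
      have : ((i : Int) + 1) = ((i + 1 : Nat) : Int) := by push_cast; ring
      rw [this, PySem.List.pyGetD_natCast, List.getD_eq_getElem _ _ (by omega)]
    rw [h1, h2] at this
    exact of_decide_eq_true this
  · intro h i hmem
    have hi : i + 1 < srt.length := by
      have := List.mem_range.1 hmem; omega
    have h1 : PySem.List.pyGetD srt (i : Int) 0 = srt[i] := by
      rw [PySem.List.pyGetD_natCast, List.getD_eq_getElem _ _ (by omega)]
    have h2 : PySem.List.pyGetD srt ((i : Int) + 1) 0 = srt[i + 1] := by
      have : ((i : Int) + 1) = ((i + 1 : Nat) : Int) := by push_cast; ring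
      rw [this, PySem.List.pyGetD_natCast, List.getD_eq_getElem _ _ (by omega)]
    rw [h1, h2]
    exact decide_eq_true (h i hi)

-- max over the set equals the last element of the sorted list; min equals its head.
lemma max_eq_last (l : List Int) (srt : List Int)
    (hperm : srt.Perm (PySem.Set.ofList l))
    (hchain : srt.IsChain (· < ·)) (hne : srt ≠ []) :
    PySem.List.max? (PySem.Set.ofList l) (fun x => x) = some (srt.getLast hne) := by
  have hsne : PySem.Set.ofList l ≠ [] := by
    intro h; rw [h] at hperm; exact hne (List.Perm.eq_nil hperm)
  cases hm : PySem.List.max? (PySem.Set.ofList l) (fun x => x) with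
  | none => exact absurd (PySem.List.max?_eq_none_iff _ _ |>.1 hm) hsne
  | some m =>
    have hmmem : m ∈ PySem.Set.ofList l := PySem.List.max?_mem hm
    have hmax : ∀ y ∈ PySem.Set.ofList l, y ≤ m := by
      intro y hy; exact PySem.List.max?_isMax hm y hy
    have hlastmem : srt.getLast hne ∈ srt := List.getLast_mem hne
    have h1 : srt.getLast hne ≤ m := hmax _ (hperm.mem_iff.1 hlastmem)
    have h2 : m ≤ srt.getLast hne :=
      mem_le_last_of_chain_lt srt hchain hne m (hperm.mem_iff.2 hmmem)
    rw [le_antisymm h2 h1]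

lemma min_eq_head (l : List Int) (a : Int) (t : List Int)
    (hperm : (a :: t).Perm (PySem.Set.ofList l))
    (hchain : (a :: t).IsChain (· < ·)) :
    PySem.List.min? (PySem.Set.ofList l) (fun x => x) = some a := by
  have hsne : PySem.Set.ofList l ≠ [] := by
    intro h; rw [h] at hperm; exact absurd (List.Perm.eq_nil hperm) (List.cons_ne_nil a t)
  cases hm : PySem.List.min? (PySem.Set.ofList l) (fun x => x) with
  | none => exact absurd (PySem.List.min?_eq_none_iff _ _ |>.1 hm) hsne
  | some m =>
    have hmmem : m ∈ PySem.Set.ofList l := PySem.List.min?_mem hm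
    have hmin : ∀ y ∈ PySem.Set.ofList l, m ≤ y := by
      intro y hy; exact PySem.List.min?_isMin hm y hy
    have h1 : m ≤ a := hmin _ (hperm.mem_iff.1 (List.mem_cons_self))
    have h2 : a ≤ m := head_le_mem_of_chain_lt a t hchain m (hperm.mem_iff.2 hmmem)
    rw [le_antisymm h2 h1]

lemma main_eq (l : List Int) : is_grote_straat l = is_grote_straat_alt l := by
  simp only [is_grote_straat, is_grote_straat_alt]
  have hlen : (PySem.List.sorted (PySem.Set.ofList l) (fun x => x) false).length
      = (PySem.Set.ofList l).length := PySem.List.length_sorted _ _ _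
  by_cases hl : (PySem.Set.ofList l).length = l.length
  · rw [if_neg (by omega), if_neg (by omega)]
    have hperm : (PySem.List.sorted (PySem.Set.ofList l) (fun x => x) false).Perm
        (PySem.Set.ofList l) := PySem.List.sorted_perm _ _ _
    have hchain : (PySem.List.sorted (PySem.Set.ofList l) (fun x => x) false).IsChain (· < ·) := by
      rw [List.isChain_iff_pairwise]
      exact PySem.List.sorted_ofList_pairwise_lt _
    cases hsrt : PySem.List.sorted (PySem.Set.ofList l) (fun x => x) false with
    | nil =>
      have : l.length = 0 := by rw [← hl, ← hlen, hsrt]; rfl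
      rw [if_pos (by simpa [List.isEmpty_iff_length_eq_zero] using this)]
      simp
    | cons a t =>
      rw [hsrt] at hperm hchain hlen
      have hlne : ¬ l.isEmpty = true := by
        simp only [List.isEmpty_iff_length_eq_zero]
        rw [← hl, ← hlen]; simp
      rw [if_neg hlne]
      rw [max_eq_last l (a :: t) hperm hchain (List.cons_ne_nil a t),
          min_eq_head l a t hperm hchain]
      have hlen' : l.length = t.length + 1 := by
        rw [← hl, ← hlen]; rfl
      rw [Bool.eq_iff_iff]
      rw [loopA_iff_chain (a :: t)]
      simp only [beq_iff_eq]
      constructor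
      · intro hch
        have := last_eq_of_chain_succ a t hch
        rw [this, hlen']
        push_cast; ring
      · intro heq
        apply chain_succ_of_last_eq a t hchain
        rw [hlen'] at heq
        push_cast at heq
        omega
  · rw [if_pos (by omega), if_pos hl]

theorem is_grote_straat_spec : Claim_equal_is_grote_straat := by
  intro l _
  exact main_eq l
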